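-- pv_equiv track=rewrite | github.com/lliurex/store | src/stacks/libhelper.py | getBundlesByPriority
-- ===== SOURCE A (Python) =====
-- def getBundlesByPriority(app):
-- 	priority=["epi","package","flatpak","snap","appimage","eduapp"]
-- 	priorityIdx={}
-- 	priorityTmp={}
-- 	bundles=app.get('bundle',{})
-- 	#If there's an epi remove the package
-- 	if "unknown" in bundles and "package" in bundles:
-- 		bundles.pop("package")
--
-- 	for bundle in bundles:
-- 		version=app.get('versions',{}).get(bundle,'lliurex')
-- 		if bundle=="unknown":
-- 			bundle="epi"
-- 		if bundle in priority:
-- 			fversion=version.split("+")[0][0:10]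
-- 			idx=priority.index(bundle)
-- 			if bundle=="epi":
-- 				bundle="unknown"
-- 			release="{} {}".format(bundle,fversion)
-- 			priorityTmp[idx]=release
-- 	if len(priorityTmp)>0:
-- 		sortedKeys=list(priorityTmp.keys())
-- 		sortedKeys.sort()
-- 		for i in sortedKeys:
-- 			priorityIdx[i]=priorityTmp[i]
-- 	return(priorityIdx)
-- ===== SOURCE B (Python) =====
-- # B: iterate the fixed priority list in index order instead of scanning the bundle
-- # dict and sorting collected indices (no temp dict, no sort). Like A, it pops
-- # 'package' from app['bundle'] in place; equivalence is about the return value.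
-- def getBundlesByPriority(app):
-- 	bundles = app.get('bundle', {})
-- 	if 'unknown' in bundles and 'package' in bundles:
-- 		bundles.pop('package')
-- 	versions = app.get('versions', {})
-- 	result = {}
-- 	for i, name in enumerate(["epi", "package", "flatpak", "snap", "appimage", "eduapp"]):
-- 		# the epi slot is stored under 'unknown' (or a legacy literal 'epi' key)
-- 		key = 'unknown' if name == 'epi' and 'unknown' in bundles else name
-- 		if key in bundles:
-- 			label = 'unknown' if name == 'epi' else name
-- 			result[i] = '{} {}'.format(label, versions.get(key, 'lliurex').split('+')[0][0:10])
-- 	return result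
-- ===== Notes on version B (the rewrite author's own statement) =====
-- stated objective: idiomatic
-- what changed: A scans the bundle dict collecting priority indices into a temp dict and then sorts the indices; B iterates the fixed priority list in index order, resolving each slot's single bundle key directly, so the temp dict and the sort disappear; Pre_ excludes apps whose bundle dict carries both an 'unknown' and a legacy literal 'epi' key, where A's slot-0 version is decided by accidental dict-iteration last-write-wins.
import Mathlib
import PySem

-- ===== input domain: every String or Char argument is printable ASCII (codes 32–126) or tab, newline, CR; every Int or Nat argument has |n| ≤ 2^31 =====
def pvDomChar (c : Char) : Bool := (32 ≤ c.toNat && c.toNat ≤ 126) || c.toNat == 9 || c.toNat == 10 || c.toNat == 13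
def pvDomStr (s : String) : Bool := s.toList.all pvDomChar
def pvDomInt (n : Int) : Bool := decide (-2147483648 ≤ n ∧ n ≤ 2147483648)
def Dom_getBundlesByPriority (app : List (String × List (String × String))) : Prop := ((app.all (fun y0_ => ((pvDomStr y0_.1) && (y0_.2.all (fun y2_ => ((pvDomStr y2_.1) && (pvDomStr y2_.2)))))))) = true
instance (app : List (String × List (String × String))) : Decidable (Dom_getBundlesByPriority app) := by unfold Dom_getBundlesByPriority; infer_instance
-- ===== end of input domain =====

-- B iterates the fixed priority list in index order instead of scanning the bundle dict and
-- sorting collected indices (idiomatic decomposition; like A, the Python B pops 'package' from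
-- app['bundle'] in place — the equivalence proved here is about the return value).


-- ===== PORT A =====
def getBundlesByPriority (app : List (String × List (String × String))) : List (Int × String) :=
  let priority : List String := ["epi","package","flatpak","snap","appimage","eduapp"]
  let bundles0 : PySem.Dict String String := PySem.Dict.mk ((PySem.Dict.mk app).getD "bundle" [])
  -- if "unknown" in bundles and "package" in bundles: bundles.pop("package")
  let bundles : PySem.Dict String String :=
    if bundles0.contains "unknown" && bundles0.contains "package" then bundles0.erase "package" else bundles0
  -- for bundle in bundles: … priorityTmp[idx]=release
  let tmp : PySem.Dict Int String := bundles.keys.foldl (fun tmp bundle0 =>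
      let version := (PySem.Dict.mk ((PySem.Dict.mk app).getD "versions" [])).getD bundle0 "lliurex"
      let bundle := if bundle0 == "unknown" then "epi" else bundle0
      if priority.contains bundle then
        let fversion := PySem.Str.slice (PySem.List.pyGetD ((PySem.Str.split? version "+").getD []) 0 "") (some 0) (some 10)
        -- priority.index(bundle): guarded by the membership test, so the .getD 0 default is never used
        let idx : Int := ((PySem.List.index? priority bundle).getD 0 : Nat)
        let bundle := if bundle == "epi" then "unknown" else bundle
        let release := PySem.Str.join " " [bundle, fversion]  -- "{} {}".format(bundle, fversion)
        tmp.insert idx release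
      else tmp) PySem.Dict.empty
  -- if len(priorityTmp)>0: insert in sorted key order
  let priorityIdx : PySem.Dict Int String :=
    if 0 < tmp.size then
      (PySem.List.sorted tmp.keys (fun x => x)).foldl (fun d i => d.insert i (tmp.getD i "")) PySem.Dict.empty
    else PySem.Dict.empty
  priorityIdx.items

-- ===== PORT B =====
def getBundlesByPriority_alt (app : List (String × List (String × String))) : List (Int × String) :=
  let bundles0 : PySem.Dict String String := PySem.Dict.mk ((PySem.Dict.mk app).getD "bundle" [])
  let bundles : PySem.Dict String String :=
    if bundles0.contains "unknown" && bundles0.contains "package" then bundles0.erase "package" else bundles0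
  let versions : PySem.Dict String String := PySem.Dict.mk ((PySem.Dict.mk app).getD "versions" [])
  -- for i, name in enumerate(priority): …  (zipIdx pairs are (name, i))
  let result : PySem.Dict Int String :=
    (["epi","package","flatpak","snap","appimage","eduapp"].zipIdx).foldl (fun acc p =>
      -- the epi slot is stored under 'unknown' (or a legacy literal 'epi' key)
      let key := if p.1 == "epi" && bundles.contains "unknown" then "unknown" else p.1
      if bundles.contains key then
        let label := if p.1 == "epi" then "unknown" else p.1
        acc.insert (p.2 : Int)
          (PySem.Str.join " " [label, PySem.Str.slice (PySem.List.pyGetD ((PySem.Str.split? (versions.getD key "lliurex") "+").getD []) 0 "") (some 0) (some 10)])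
      else acc) PySem.Dict.empty
  result.items

-- ===== PRECONDITION & SPEC =====
-- Pre_ excludes apps whose 'bundle' dict carries BOTH an 'unknown' and a legacy literal 'epi'
-- key: both feed priority slot 0, and which version A reports there is decided by accidental
-- dict-iteration last-write-wins — a corner where either value is defensible.
def Pre_getBundlesByPriority (app : List (String × List (String × String))) : Prop :=
  ¬ ((PySem.Dict.mk ((PySem.Dict.mk app).getD "bundle" [])).contains "unknown" = true ∧
     (PySem.Dict.mk ((PySem.Dict.mk app).getD "bundle" [])).contains "epi" = true)
instance (app : List (String × List (String × String))) : Decidable (Pre_getBundlesByPriority app) := by unfold Pre_getBundlesByPriority; infer_instance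

def pvWitness_getBundlesByPriority : (List (String × List (String × String))) :=
  [("bundle", [("unknown", "2.1+lliurex3"), ("snap", "0.4")]), ("versions", [("unknown", "2.1+lliurex3")])]

def Spec_getBundlesByPriority (app : List (String × List (String × String))) (out : List (Int × String)) : Prop := out = getBundlesByPriority_alt app
instance (app : List (String × List (String × String))) (out : List (Int × String)) : Decidable (Spec_getBundlesByPriority app out) := by unfold Spec_getBundlesByPriority; infer_instance

-- ===== CLAIM (what is proved, stated in full; the proofs are below) =====
def Claim_equal_getBundlesByPriority : Prop := ∀ (app : List (String × List (String × String))), Dom_getBundlesByPriority app → Pre_getBundlesByPriority app → Spec_getBundlesByPriority app (getBundlesByPriority app)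

-- ===== LEMMAS AND PROOFS =====

-- proof-only vocabulary: the priority index a bundle key falls into, and the release string built for it
def pvFver (vs : PySem.Dict String String) (k : String) : String :=
  PySem.Str.slice (PySem.List.pyGetD ((PySem.Str.split? (vs.getD k "lliurex") "+").getD []) 0 "") (some 0) (some 10)

def pvIdx (k : String) : Option Nat :=
  if k == "unknown" || k == "epi" then some 0
  else if k == "package" then some 1 else if k == "flatpak" then some 2
  else if k == "snap" then some 3 else if k == "appimage" then some 4
  else if k == "eduapp" then some 5 else none

def pvRel (vs : PySem.Dict String String) (i : Nat) (k : String) : String :=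
  PySem.Str.join " " [["unknown","package","flatpak","snap","appimage","eduapp"].getD i "", pvFver vs k]

def pvPred (j : Int) (k : String) : Bool := (pvIdx k).map (fun n => (n : Int)) == some j

-- A's loop body equals a dispatch on pvIdx
lemma pv_stepA (vs : PySem.Dict String String) (tmp : PySem.Dict Int String) (k : String) :
    (let version := vs.getD k "lliurex"
     let bundle := if k == "unknown" then "epi" else k
     if (["epi","package","flatpak","snap","appimage","eduapp"] : List String).contains bundle then
       let fversion := PySem.Str.slice (PySem.List.pyGetD ((PySem.Str.split? version "+").getD []) 0 "") (some 0) (some 10)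
       let idx : Int := ((PySem.List.index? ["epi","package","flatpak","snap","appimage","eduapp"] bundle).getD 0 : Nat)
       let bundle := if bundle == "epi" then "unknown" else bundle
       let release := PySem.Str.join " " [bundle, fversion]
       tmp.insert idx release
     else tmp)
    = match pvIdx k with
      | some i => tmp.insert (i : Int) (pvRel vs i k)
      | none => tmp := by
  by_cases h0 : k = "unknown"; · subst k; rfl
  by_cases h1 : k = "epi"; · subst k; rfl
  by_cases h2 : k = "package"; · subst k; rfl
  by_cases h3 : k = "flatpak"; · subst k; rfl
  by_cases h4 : k = "snap"; · subst k; rfl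
  by_cases h5 : k = "appimage"; · subst k; rfl
  by_cases h6 : k = "eduapp"; · subst k; rfl
  simp [pvIdx, h0, h1, h2, h3, h4, h5, h6]

-- get? of A's accumulation dict: the release of the LAST key falling into slot j
lemma pv_tmpA_get? (vs : PySem.Dict String String) (ks : List String) (d : PySem.Dict Int String) (j : Int) :
    ((ks.foldl (fun tmp k => match pvIdx k with
        | some i => tmp.insert (i : Int) (pvRel vs i k)
        | none => tmp) d).get? j)
    = match (ks.filter (pvPred j)).getLast? with
      | some k => some (pvRel vs j.toNat k)
      | none => d.get? j := by
  induction ks generalizing d with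
  | nil => rfl
  | cons k t ih =>
    simp only [List.foldl_cons, List.filter_cons]
    cases hk : pvIdx k with
    | none =>
      have hp : pvPred j k = false := by simp [pvPred, hk]
      simp only [hp, Bool.false_eq_true, if_false, ih]
    | some i =>
      by_cases hj : j = (i : Int)
      · subst hj
        have hp : pvPred (i : Int) k = true := by simp [pvPred, hk]
        simp only [hp, if_true, ih]
        cases ht : (t.filter (pvPred (i : Int))).getLast? with
        | some k' => simp [List.getLast?_cons, ht]
        | none => simp [List.getLast?_cons, ht, PySem.Dict.get?_insert_self]
      · have hp : pvPred j k = false := by simp [pvPred, hk]; omega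
        simp only [hp, Bool.false_eq_true, if_false, ih]
        cases ht : (t.filter (pvPred j)).getLast? with
        | some k' => rfl
        | none => simp [PySem.Dict.get?_insert_of_ne _ _ hj]

lemma pv_tmpA_nodup (vs : PySem.Dict String String) (ks : List String) (d : PySem.Dict Int String)
    (h : d.keys.Nodup) :
    ((ks.foldl (fun tmp k => match pvIdx k with
        | some i => tmp.insert (i : Int) (pvRel vs i k)
        | none => tmp) d).keys).Nodup := by
  induction ks generalizing d with
  | nil => exact h
  | cons k t ih =>
    simp only [List.foldl_cons]
    cases hk : pvIdx k with
    | none => exact ih d h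
    | some i => exact ih _ (PySem.Dict.nodup_keys_insert _ _ _ h)

lemma pv_pvIdx_lt (k : String) (i : Nat) (h : pvIdx k = some i) : i < 6 := by
  unfold pvIdx at h; split_ifs at h <;> simp_all only [Option.some.injEq] <;> omega

-- conditional-insert fold over fresh distinct keys: items is a filterMap
lemma pv_items_foldl_optInsert {β : Type} (l : List β) (key : β → Int) (val : β → Option String)
    (d : PySem.Dict Int String)
    (hfresh : ∀ a ∈ l, d.contains (key a) = false) (hnd : (l.map key).Nodup) :
    (l.foldl (fun acc a => match val a with
        | some v => acc.insert (key a) v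
        | none => acc) d).items
    = d.items ++ l.filterMap (fun a => (val a).map (fun v => (key a, v))) := by
  induction l generalizing d with
  | nil => simp
  | cons a t ih =>
    simp only [List.foldl_cons, List.filterMap_cons, List.map_cons, List.nodup_cons] at *
    cases hv : val a with
    | none => simpa using ih d (fun b hb => hfresh b (List.mem_cons_of_mem _ hb)) hnd.2
    | some v =>
      have hne : ∀ b ∈ t, (d.insert (key a) v).contains (key b) = false := by
        intro b hb
        rw [PySem.Dict.contains_insert]
        have : key b ≠ key a := by
          intro hEq; exact hnd.1 (hEq ▸ List.mem_map_of_mem hb)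
        simp [this, hfresh b (List.mem_cons_of_mem _ hb)]
      rw [ih _ hne hnd.2, PySem.Dict.items_insert_of_not_contains _ _ (hfresh a (List.mem_cons_self))]
      simp

-- A's filter-then-map over candidate keys is a filterMap on get?
lemma pv_filter_map_get? (l : List Int) (d : PySem.Dict Int String) :
    ((l.filter (fun j => (d.get? j).isSome)).map (fun j => (j, d.getD j "")))
    = l.filterMap (fun j => (d.get? j).map (fun v => (j, v))) := by
  induction l with
  | nil => rfl
  | cons j t ih =>
    simp only [List.filter_cons, List.filterMap_cons]
    cases hj : d.get? j with
    | none => simp [hj, ih]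
    | some v => simp [ih, PySem.Dict.getD_of_get?_eq_some _ _ hj]

-- slot predicates as equalities
lemma pv_predB0 (k : String) : (k == "unknown" || k == "epi") = pvPred 0 k := by
  unfold pvPred pvIdx; split_ifs with h1 <;> simp_all
lemma pv_predB1 (k : String) : (k == "package") = pvPred 1 k := by
  unfold pvPred pvIdx
  split_ifs with h1 h2 h3 h4 h5 h6 <;> simp_all <;> rcases h1 with h | h <;> simp [h]
lemma pv_predB2 (k : String) : (k == "flatpak") = pvPred 2 k := by
  unfold pvPred pvIdx
  split_ifs with h1 h2 h3 h4 h5 h6 <;> simp_all <;> rcases h1 with h | h <;> simp [h]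
lemma pv_predB3 (k : String) : (k == "snap") = pvPred 3 k := by
  unfold pvPred pvIdx
  split_ifs with h1 h2 h3 h4 h5 h6 <;> simp_all <;> rcases h1 with h | h <;> simp [h]
lemma pv_predB4 (k : String) : (k == "appimage") = pvPred 4 k := by
  unfold pvPred pvIdx
  split_ifs with h1 h2 h3 h4 h5 h6 <;> simp_all <;> rcases h1 with h | h <;> simp [h]
lemma pv_predB5 (k : String) : (k == "eduapp") = pvPred 5 k := by
  unfold pvPred pvIdx
  split_ifs with h1 h2 h3 h4 h5 h6 <;> simp_all <;> rcases h1 with h | h <;> simp [h]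

-- last element of a filter that can only ever keep the single string k
lemma pv_filter_getLast? (ks : List String) (p : String → Bool) (k : String)
    (h : ∀ x ∈ ks, p x = true → x = k) (hk : p k = true) :
    (ks.filter p).getLast? = if k ∈ ks then some k else none := by
  by_cases hks : k ∈ ks
  · have hne : ks.filter p ≠ [] := List.ne_nil_of_mem (List.mem_filter.mpr ⟨hks, hk⟩)
    cases hL : (ks.filter p).getLast? with
    | none => exact absurd (List.getLast?_eq_none_iff.mp hL) hne
    | some y =>
      have hy := List.mem_filter.mp (List.mem_of_getLast? hL)
      rw [if_pos hks, h y hy.1 hy.2]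
  · rw [if_neg hks, List.getLast?_eq_none_iff]
    refine List.filter_eq_nil_iff.mpr (fun x hx hp => ?_)
    exact hks ((h x hx hp) ▸ hx)

lemma pv_main (vs bundles : PySem.Dict String String)
    (hpre : ¬ ("unknown" ∈ bundles.keys ∧ "epi" ∈ bundles.keys)) :
    (let tmp : PySem.Dict Int String := bundles.keys.foldl (fun tmp bundle0 =>
        let version := vs.getD bundle0 "lliurex"
        let bundle := if bundle0 == "unknown" then "epi" else bundle0
        if (["epi","package","flatpak","snap","appimage","eduapp"] : List String).contains bundle then
          let fversion := PySem.Str.slice (PySem.List.pyGetD ((PySem.Str.split? version "+").getD []) 0 "") (some 0) (some 10)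
          let idx : Int := ((PySem.List.index? ["epi","package","flatpak","snap","appimage","eduapp"] bundle).getD 0 : Nat)
          let bundle := if bundle == "epi" then "unknown" else bundle
          let release := PySem.Str.join " " [bundle, fversion]
          tmp.insert idx release
        else tmp) PySem.Dict.empty
     (if 0 < tmp.size then
        (PySem.List.sorted tmp.keys (fun x => x)).foldl (fun d i => d.insert i (tmp.getD i "")) PySem.Dict.empty
      else PySem.Dict.empty).items)
    = ((["epi","package","flatpak","snap","appimage","eduapp"].zipIdx).foldl (fun acc p =>
        let key := if p.1 == "epi" && bundles.contains "unknown" then "unknown" else p.1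
        if bundles.contains key then
          let label := if p.1 == "epi" then "unknown" else p.1
          acc.insert (p.2 : Int)
            (PySem.Str.join " " [label, PySem.Str.slice (PySem.List.pyGetD ((PySem.Str.split? (vs.getD key "lliurex") "+").getD []) 0 "") (some 0) (some 10)])
        else acc) PySem.Dict.empty).items := by
  have he : (List.foldl (fun tmp bundle0 =>
        let version := vs.getD bundle0 "lliurex"
        let bundle := if bundle0 == "unknown" then "epi" else bundle0
        if (["epi","package","flatpak","snap","appimage","eduapp"] : List String).contains bundle then
          let fversion := PySem.Str.slice (PySem.List.pyGetD ((PySem.Str.split? version "+").getD []) 0 "") (some 0) (some 10)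
          let idx : Int := ((PySem.List.index? ["epi","package","flatpak","snap","appimage","eduapp"] bundle).getD 0 : Nat)
          let bundle := if bundle == "epi" then "unknown" else bundle
          let release := PySem.Str.join " " [bundle, fversion]
          tmp.insert idx release
        else tmp) PySem.Dict.empty bundles.keys)
      = List.foldl (fun tmp k => match pvIdx k with
          | some i => tmp.insert (i : Int) (pvRel vs i k)
          | none => tmp) PySem.Dict.empty bundles.keys :=
    PySem.List.foldl_congr_mem _ _ _ _ (fun acc k _ => pv_stepA vs acc k)
  simp only [he]
  set ks := bundles.keys with hks
  set tmp := List.foldl (fun tmp k => match pvIdx k with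
      | some i => tmp.insert (i : Int) (pvRel vs i k)
      | none => tmp) PySem.Dict.empty ks with htmp
  have hget : ∀ j : Int, tmp.get? j = ((ks.filter (pvPred j)).getLast?).map (fun k => pvRel vs j.toNat k) := by
    intro j
    rw [htmp, pv_tmpA_get?]
    cases hL : (ks.filter (pvPred j)).getLast? <;> simp [hL]
  have hnd : tmp.keys.Nodup := pv_tmpA_nodup vs ks _ PySem.Dict.nodup_keys_empty
  -- rewrite B's loop body into an optional-insert over the slot value
  have hcont : ∀ k : String, bundles.contains k = decide (k ∈ ks) := fun k =>
    PySem.Dict.contains_eq_decide_mem_keys bundles k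
  have hBbody : ∀ (acc : PySem.Dict Int String) (p : String × Nat),
      p ∈ (["epi","package","flatpak","snap","appimage","eduapp"].zipIdx) →
      (let key := if p.1 == "epi" && bundles.contains "unknown" then "unknown" else p.1
       if bundles.contains key then
         let label := if p.1 == "epi" then "unknown" else p.1
         acc.insert (p.2 : Int)
           (PySem.Str.join " " [label, PySem.Str.slice (PySem.List.pyGetD ((PySem.Str.split? (vs.getD key "lliurex") "+").getD []) 0 "") (some 0) (some 10)])
       else acc)
      = (match (((ks.filter (pvPred (p.2 : Int))).getLast?).map (fun k => pvRel vs p.2 k)) with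
         | some v => acc.insert ((p.2 : Int)) v
         | none => acc) := by
    intro acc p hp
    simp only [List.zipIdx, List.mem_cons, List.not_mem_nil, or_false] at hp
    rcases hp with h | h | h | h | h | h
    · -- slot 0, name "epi"
      subst h
      simp only [Nat.reduceAdd, Nat.cast_ofNat, Nat.cast_zero, Nat.cast_one]
      by_cases hu : "unknown" ∈ ks
      · have hfil : (ks.filter (pvPred (0:Int))).getLast? = some "unknown" := by
          rw [pv_filter_getLast? ks _ "unknown" (fun x hx hpx => ?_) (by decide), if_pos hu]
          rw [← pv_predB0] at hpx
          rcases (by simpa using hpx : x = "unknown" ∨ x = "epi") with h | h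
          · exact h
          · exact absurd ⟨hu, h ▸ hx⟩ hpre
        rw [hfil]
        simp [hcont, hu, pvRel, pvFver]
      · have hfil : (ks.filter (pvPred (0:Int))).getLast? = if "epi" ∈ ks then some "epi" else none := by
          refine pv_filter_getLast? ks _ "epi" (fun x hx hpx => ?_) (by decide)
          rw [← pv_predB0] at hpx
          rcases (by simpa using hpx : x = "unknown" ∨ x = "epi") with h | h
          · exact absurd (h ▸ hx) hu
          · exact h
        rw [hfil]
        by_cases he' : "epi" ∈ ks <;> simp [hcont, hu, he', pvRel, pvFver]
    · subst h
      simp only [Nat.reduceAdd, Nat.cast_ofNat, Nat.cast_zero, Nat.cast_one]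
      have hfil : (ks.filter (pvPred (1:Int))).getLast? = if "package" ∈ ks then some "package" else none := by
        refine pv_filter_getLast? ks _ "package" (fun x hx hpx => ?_) (by decide)
        rw [← pv_predB1] at hpx; simpa using hpx
      rw [hfil]
      by_cases hm : "package" ∈ ks <;> simp [hcont, hm, pvRel, pvFver]
    · subst h
      simp only [Nat.reduceAdd, Nat.cast_ofNat, Nat.cast_zero, Nat.cast_one]
      have hfil : (ks.filter (pvPred (2:Int))).getLast? = if "flatpak" ∈ ks then some "flatpak" else none := by
        refine pv_filter_getLast? ks _ "flatpak" (fun x hx hpx => ?_) (by decide)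
        rw [← pv_predB2] at hpx; simpa using hpx
      rw [hfil]
      by_cases hm : "flatpak" ∈ ks <;> simp [hcont, hm, pvRel, pvFver]
    · subst h
      simp only [Nat.reduceAdd, Nat.cast_ofNat, Nat.cast_zero, Nat.cast_one]
      have hfil : (ks.filter (pvPred (3:Int))).getLast? = if "snap" ∈ ks then some "snap" else none := by
        refine pv_filter_getLast? ks _ "snap" (fun x hx hpx => ?_) (by decide)
        rw [← pv_predB3] at hpx; simpa using hpx
      rw [hfil]
      by_cases hm : "snap" ∈ ks <;> simp [hcont, hm, pvRel, pvFver]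
    · subst h
      simp only [Nat.reduceAdd, Nat.cast_ofNat, Nat.cast_zero, Nat.cast_one]
      have hfil : (ks.filter (pvPred (4:Int))).getLast? = if "appimage" ∈ ks then some "appimage" else none := by
        refine pv_filter_getLast? ks _ "appimage" (fun x hx hpx => ?_) (by decide)
        rw [← pv_predB4] at hpx; simpa using hpx
      rw [hfil]
      by_cases hm : "appimage" ∈ ks <;> simp [hcont, hm, pvRel, pvFver]
    · subst h
      simp only [Nat.reduceAdd, Nat.cast_ofNat, Nat.cast_zero, Nat.cast_one]
      have hfil : (ks.filter (pvPred (5:Int))).getLast? = if "eduapp" ∈ ks then some "eduapp" else none := by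
        refine pv_filter_getLast? ks _ "eduapp" (fun x hx hpx => ?_) (by decide)
        rw [← pv_predB5] at hpx; simpa using hpx
      rw [hfil]
      by_cases hm : "eduapp" ∈ ks <;> simp [hcont, hm, pvRel, pvFver]
  rw [show (List.foldl (fun acc p =>
        let key := if p.1 == "epi" && bundles.contains "unknown" then "unknown" else p.1
        if bundles.contains key then
          let label := if p.1 == "epi" then "unknown" else p.1
          acc.insert (p.2 : Int)
            (PySem.Str.join " " [label, PySem.Str.slice (PySem.List.pyGetD ((PySem.Str.split? (vs.getD key "lliurex") "+").getD []) 0 "") (some 0) (some 10)])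
        else acc)
        PySem.Dict.empty (["epi","package","flatpak","snap","appimage","eduapp"].zipIdx))
      = (List.foldl (fun acc p =>
          match (((ks.filter (pvPred (p.2 : Int))).getLast?).map (fun k => pvRel vs p.2 k)) with
          | some v => acc.insert ((p.2 : Int)) v
          | none => acc)
        PySem.Dict.empty (["epi","package","flatpak","snap","appimage","eduapp"].zipIdx))
    from PySem.List.foldl_congr_mem _ _ _ _ hBbody]
  rw [pv_items_foldl_optInsert (["epi","package","flatpak","snap","appimage","eduapp"].zipIdx)
        (fun p => ((p.2 : Nat) : Int))
        (fun p => (((ks.filter (pvPred (p.2 : Int))).getLast?).map (fun k => pvRel vs p.2 k)))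
        PySem.Dict.empty (by intro a _; rfl) (by decide)]
  by_cases hsz : 0 < tmp.size
  · -- nonempty: the sorted key list is exactly the present slots 0..5 in ascending order
    have hmemkeys : ∀ j : Int, j ∈ tmp.keys ↔ (tmp.get? j).isSome := by
      intro j
      have h := PySem.Dict.get?_eq_none_iff_not_mem_keys tmp j
      rw [Option.isSome_iff_ne_none]
      constructor
      · intro hm h0; exact (h.mp h0) hm
      · intro hne; by_contra hm; exact hne (h.mpr hm)
    have hrange : ∀ j : Int, (tmp.get? j).isSome → j ∈ ([0,1,2,3,4,5] : List Int) := by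
      intro j hj
      rw [hget j] at hj
      cases hL : (ks.filter (pvPred j)).getLast? with
      | none => rw [hL] at hj; simp at hj
      | some k =>
        have hk : k ∈ ks.filter (pvPred j) := List.mem_of_getLast? hL
        have hp : pvPred j k = true := (List.mem_filter.mp hk).2
        unfold pvPred at hp
        cases hik : pvIdx k with
        | none => rw [hik] at hp; simp at hp
        | some i =>
          rw [hik] at hp; simp at hp
          have h6 := pv_pvIdx_lt k i hik
          rw [← hp]
          interval_cases i <;> simp
    have hndcand : (([0,1,2,3,4,5] : List Int).filter (fun j => (tmp.get? j).isSome)).Nodup :=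
      List.Nodup.filter _ (by decide)
    have hperm : (([0,1,2,3,4,5] : List Int).filter (fun j => (tmp.get? j).isSome)).Perm tmp.keys :=
      (List.perm_ext_iff_of_nodup hndcand hnd).mpr (by
        intro j
        simp only [List.mem_filter, hmemkeys j]
        exact ⟨fun h => h.2, fun h => ⟨hrange j h, h⟩⟩)
    have hsorted : PySem.List.sorted tmp.keys (fun x => x)
        = ([0,1,2,3,4,5] : List Int).filter (fun j => (tmp.get? j).isSome) :=
      PySem.List.sorted_eq_of_perm_of_pairwise_lt _ _ _ hperm (List.Pairwise.filter _ (by decide))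
    simp only [if_pos hsz, hsorted]
    rw [PySem.Dict.items_foldl_insert_fresh _ (fun j => j) (fun j => tmp.getD j "")
          PySem.Dict.empty (by intro a _; rfl) (by simpa using hndcand)]
    rw [pv_filter_map_get?]
    have e0 : tmp.get? 0 = ((ks.filter (pvPred 0)).getLast?).map (fun k => pvRel vs 0 k) := by simpa using hget 0
    have e1 : tmp.get? 1 = ((ks.filter (pvPred 1)).getLast?).map (fun k => pvRel vs 1 k) := by simpa using hget 1
    have e2 : tmp.get? 2 = ((ks.filter (pvPred 2)).getLast?).map (fun k => pvRel vs 2 k) := by simpa using hget 2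
    have e3 : tmp.get? 3 = ((ks.filter (pvPred 3)).getLast?).map (fun k => pvRel vs 3 k) := by simpa using hget 3
    have e4 : tmp.get? 4 = ((ks.filter (pvPred 4)).getLast?).map (fun k => pvRel vs 4 k) := by simpa using hget 4
    have e5 : tmp.get? 5 = ((ks.filter (pvPred 5)).getLast?).map (fun k => pvRel vs 5 k) := by simpa using hget 5
    simp only [List.zipIdx, List.filterMap_cons, List.filterMap_nil, e0, e1, e2, e3, e4, e5,
      Option.map_map, Nat.cast_ofNat, Nat.cast_zero, Nat.cast_one]
    rfl
  · -- empty temp dict: every slot is empty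
    have hitems : tmp.items = [] := by
      have hsz' : tmp.size = 0 := Nat.eq_zero_of_not_pos hsz
      exact List.length_eq_zero_iff.mp hsz'
    have hnone : ∀ j : Int, ((ks.filter (pvPred j)).getLast?).map (fun k => pvRel vs j.toNat k) = none := by
      intro j
      rw [← hget j]
      rw [PySem.Dict.get?_eq_none_iff_not_mem_keys]
      intro hmem
      rw [show tmp.keys = tmp.items.map Prod.fst from rfl, hitems] at hmem
      simp at hmem
    have hfilter : ∀ j : Int, ks.filter (pvPred j) = [] := by
      intro j
      have hx := Option.map_eq_none_iff.mp (hnone j)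
      exact List.getLast?_eq_none_iff.mp hx
    simp only [if_neg hsz]
    simp [List.zipIdx, hfilter]

-- membership in the keys of the possibly-erased bundle dict implies membership before the erase
lemma pv_mem_keys_erase (d : PySem.Dict String String) (k x : String)
    (h : x ∈ (d.erase k).keys) : x ∈ d.keys := by
  simp only [PySem.Dict.erase, PySem.Dict.keys, List.mem_map] at h ⊢
  obtain ⟨p, hp, hpx⟩ := h
  exact ⟨p, List.mem_of_mem_filter hp, hpx⟩

-- ===== VERDICT (by name: the statement is the Claim_ definition above) =====
theorem getBundlesByPriority_spec : Claim_equal_getBundlesByPriority := by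
  intro app _hdom hpre
  unfold Pre_getBundlesByPriority at hpre
  set bundles0 : PySem.Dict String String := PySem.Dict.mk ((PySem.Dict.mk app).getD "bundle" []) with hb0
  have hpre' : ¬ ("unknown" ∈ bundles0.keys ∧ "epi" ∈ bundles0.keys) := by
    intro ⟨h1, h2⟩
    exact hpre ⟨(PySem.Dict.contains_iff_mem_keys _ _).mpr h1, (PySem.Dict.contains_iff_mem_keys _ _).mpr h2⟩
  have hpreE : ∀ b : PySem.Dict String String,
      b = (if bundles0.contains "unknown" && bundles0.contains "package" then bundles0.erase "package" else bundles0) →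
      ¬ ("unknown" ∈ b.keys ∧ "epi" ∈ b.keys) := by
    intro b hb ⟨h1, h2⟩
    split at hb
    · exact hpre' ⟨pv_mem_keys_erase _ _ _ (hb ▸ h1), pv_mem_keys_erase _ _ _ (hb ▸ h2)⟩
    · exact hpre' ⟨hb ▸ h1, hb ▸ h2⟩
  exact pv_main (PySem.Dict.mk ((PySem.Dict.mk app).getD "versions" []))
    (if bundles0.contains "unknown" && bundles0.contains "package" then bundles0.erase "package" else bundles0)
    (hpreE _ rfl)
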